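/- GENERATED by c/gen_decode.py: decode facts of the image, one per distinct instruction byte string. -/
import UserX.DecodeImage

#decode_all Vorbis.Dec
  "0f28f7"  -- movaps xmm6,xmm7
  "0f848afeffff"  -- je 110e60
  "0f8534010000"  -- jne 115cef
  "0f8c86000000"  -- jl 108ea6
  "0f94c0"  -- sete al
  "0fb703"  -- movzx eax,WORD PTR [rbx]
  "39eb"  -- cmp ebx,ebp
  "410fb65601"  -- movzx edx,BYTE PTR [r14+0x1]
  "41807c241900"  -- cmp BYTE PTR [r12+0x19],0x0
  "41896d00"  -- mov DWORD PTR [r13+0x0],ebp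
  "418b86f4060000"  -- mov eax,DWORD PTR [r14+0x6f4]
  "41d1fc"  -- sar r12d,1
  "440fb67310"  -- movzx r14d,BYTE PTR [rbx+0x10]
  "443ba540010000"  -- cmp r12d,DWORD PTR [rbp+0x140]
  "44897b0c"  -- mov DWORD PTR [rbx+0xc],r15d
  "448b442434"  -- mov r8d,DWORD PTR [rsp+0x34]
  "448bb5e4060000"  -- mov r14d,DWORD PTR [rbp+0x6e4]
  "4585c0"  -- test r8d,r8d
  "458b7424e4"  -- mov r14d,DWORD PTR [r12-0x1c]
  "48039da8000000"  -- add rbx,QWORD PTR [rbp+0xa8]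
  "4863c5"  -- movsxd rax,ebp
  "4883c408"  -- add rsp,0x8
  "4889542408"  -- mov QWORD PTR [rsp+0x8],rdx
  "488b03"  -- mov rax,QWORD PTR [rbx]
  "488b7c2440"  -- mov rdi,QWORD PTR [rsp+0x40]
  "488d44240f"  -- lea rax,[rsp+0xf]
  "488d7bdc"  -- lea rdi,[rbx-0x24]
  "488db42480020000"  -- lea rsi,[rsp+0x280]
  "488dbcc568040000"  -- lea rdi,[rbp+rax*8+0x468]
  "48c1e734"  -- shl rdi,0x34
  "49034610"  -- add rax,QWORD PTR [r14+0x10]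
  "4983c418"  -- add r12,0x18
  "498d2c1c"  -- lea rbp,[r12+rbx*1]
  "498d7e70"  -- lea rdi,[r14+0x70]
  "49c7855801c00000000000"  -- mov QWORD PTR [r13+0xc00158],0x0
  "4b8d1424"  -- lea rdx,[r12+r12*1]
  "4c892c24"  -- mov QWORD PTR [rsp],r13
  "4c8b45c0"  -- mov r8,QWORD PTR [rbp-0x40]
  "4c8d3482"  -- lea r14,[rdx+rax*4]
  "4d63ed"  -- movsxd r13,r13d
  "4d8dbe8c000000"  -- lea r15,[r14+0x8c]
  "660f6ec3"  -- movd xmm0,ebx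
  "66418906"  -- mov WORD PTR [r14],ax
  "724d"  -- jb 111be1
  "7459"  -- je 108ff3
  "755f"  -- jne 11681f
  "7c12"  -- jl 114d41
  "7e7e"  -- jle 108b50
  "80fbff"  -- cmp bl,0xff
  "83c701"  -- add edi,0x1
  "89442430"  -- mov DWORD PTR [rsp+0x30],eax
  "898d68ffffff"  -- mov DWORD PTR [rbp-0x98],ecx
  "8b44241c"  -- mov eax,DWORD PTR [rsp+0x1c]
  "8b7504"  -- mov esi,DWORD PTR [rbp+0x4]
  "8d348d00000000"  -- lea esi,[rcx*4+0x0]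
  "be04000000"  -- mov esi,0x4
  "c6842c4001000001"  -- mov BYTE PTR [rsp+rbp*1+0x140],0x1
  "c783a400c000f3f3f3f3"  -- mov DWORD PTR [rbx+0xc000a4],0xf3f3f3f3
  "e8049bffff"  -- call 100640
  "e80dbcfeff"  -- call 1003c0
  "e81854ffff"  -- call 100720
  "e821bbfeff"  -- call 100300
  "e82b73ffff"  -- call 100640
  "e833b3ffff"  -- call 100640
  "e83f77ffff"  -- call 10d1c0
  "e848f6feff"  -- call 100640
  "e85498ffff"  -- call 100800
  "e861d4feff"  -- call 100720
  "e86cd3feff"  -- call 100720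
  "e878b4ffff"  -- call 100640
  "e88379ffff"  -- call 100480
  "e88e73ffff"  -- call 100720
  "e897c3feff"  -- call 100640
  "e8a18fffff"  -- call 10d1c0
  "e8ace2feff"  -- call 103d00
  "e8b5f8feff"  -- call 103d00
  "e8c0b1feff"  -- call 100560
  "e8c9f4feff"  -- call 103d00
  "e8d4c4ffff"  -- call 10cf40
  "e8df87ffff"  -- call 100720
  "e8e840ffff"  -- call 108f20
  "e8efc6feff"  -- call 100800
  "e8fb72ffff"  -- call 100640
  "e928010000"  -- jmp 10f825
  "e96dffffff"  -- jmp 112f26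
  "e9c9e0ffff"  -- jmp 113b22
  "eb1d"  -- jmp 103e02
  "ebaf"  -- jmp 10ead6
  "f20f100d6edd0100"  -- movsd xmm1,QWORD PTR [rip+0x1dd6e]
  "f20f591588dc0100"  -- mulsd xmm2,QWORD PTR [rip+0x1dc88]
  "f30f1003"  -- movss xmm0,DWORD PTR [rbx]
  "f30f10630c"  -- movss xmm4,DWORD PTR [rbx+0xc]
  "f30f1138"  -- movss DWORD PTR [rax],xmm7
  "f30f115dc0"  -- movss DWORD PTR [rbp-0x40],xmm3
  "f30f5843ec"  -- addss xmm0,DWORD PTR [rbx-0x14]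
  "f30f594d24"  -- mulss xmm1,DWORD PTR [rbp+0x24]
  "f30f5ccf"  -- subss xmm1,xmm7
  "f3410f1126"  -- movss DWORD PTR [r14],xmm4
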